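-- pv_equiv track=rewrite | github.com/bhklab/TCRP_Reusability_Report | code/tcrp_model/pipelines/prepare_complete_run.py | make_chunks
-- ===== SOURCE A (Python) =====
-- def make_chunks(iterable, nchunks):
--     length = len(iterable)
--     chunk_size = (length // nchunks)
--     remainder = length % nchunks
--
--     chunks = []
--     i = 0
--     while i < length:
--         if remainder != 0:
--             end = i + chunk_size + 1
--             remainder -= 1
--         else:
--             end = i + chunk_size
--
--         chunks.append(iterable[i:end])
--         i = end
--
--     return chunks
-- ===== SOURCE B (Python) =====
-- def make_chunks(iterable, nchunks):
--     chunk_size, remainder = divmod(len(iterable), nchunks)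
--     chunks = []
--     for j in range(nchunks):
--         start = j * chunk_size + min(j, remainder)
--         end = start + chunk_size + (1 if j < remainder else 0)
--         if start >= end:
--             break
--         chunks.append(iterable[start:end])
--     return chunks
-- ===== Notes on version B (the rewrite author's own statement) =====
-- stated objective: simpler
-- what changed: Replaces A's accumulator-threading while-loop (mutating i and remainder) with a single for-loop over range(nchunks) computing each slice's bounds in closed form from j, chunk_size and remainder, breaking when the slice would be empty.
import Mathlib
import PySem

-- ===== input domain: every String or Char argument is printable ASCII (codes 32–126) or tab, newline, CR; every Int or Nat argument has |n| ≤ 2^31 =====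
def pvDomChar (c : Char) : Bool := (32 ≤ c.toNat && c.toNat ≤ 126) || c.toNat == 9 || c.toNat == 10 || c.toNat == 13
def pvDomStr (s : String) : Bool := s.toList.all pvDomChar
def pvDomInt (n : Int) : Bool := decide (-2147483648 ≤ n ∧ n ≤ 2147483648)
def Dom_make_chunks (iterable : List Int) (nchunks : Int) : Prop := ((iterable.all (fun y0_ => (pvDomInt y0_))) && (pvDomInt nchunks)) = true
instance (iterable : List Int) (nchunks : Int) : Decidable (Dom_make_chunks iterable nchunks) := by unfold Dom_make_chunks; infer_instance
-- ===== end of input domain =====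

-- B replaces A's accumulator-threading while-loop by an index-driven pass computing each
-- slice's bounds in closed form from j, chunk_size and remainder (objective: simpler).

-- ===== PORT A =====
-- A's while-loop: state (i, remainder); fuel only makes the recursion total (it is ample
-- on every input Pre_ admits).
def makeChunksLoop (iterable : List Int) (length chunk_size : Int) :
    Nat → Int → Int → List (List Int)
  | 0, _, _ => []
  | fuel+1, i, remainder =>
    if i < length then
      if remainder ≠ 0 then
        PySem.List.slice iterable (some i) (some (i + chunk_size + 1)) ::
          makeChunksLoop iterable length chunk_size fuel (i + chunk_size + 1) (remainder - 1)
      else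
        PySem.List.slice iterable (some i) (some (i + chunk_size)) ::
          makeChunksLoop iterable length chunk_size fuel (i + chunk_size) remainder
    else []

def make_chunks (iterable : List Int) (nchunks : Int) : List (List Int) :=
  let length : Int := iterable.length
  match PySem.Int.divmod? length nchunks with
  | none => []  -- Python raises ZeroDivisionError here; excluded by Pre_
  | some (chunk_size, remainder) =>
      makeChunksLoop iterable length chunk_size (iterable.length + nchunks.natAbs + 1) 0 remainder

-- ===== PORT B =====
-- B's for-loop over range(nchunks) with break when the slice would be empty
-- (range is lazy in Python, so the loop is ported as a counter recursion on j).
def makeChunksAltLoop (iterable : List Int) (chunk_size remainder nchunks : Int)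
    (j : Int) : List (List Int) :=
  if hj : j < nchunks then
    let start := j * chunk_size + min j remainder
    let stop := start + chunk_size + (if j < remainder then 1 else 0)
    if start ≥ stop then []
    else PySem.List.slice iterable (some start) (some stop) ::
           makeChunksAltLoop iterable chunk_size remainder nchunks (j + 1)
  else []
termination_by (nchunks - j).toNat
decreasing_by omega

def make_chunks_alt (iterable : List Int) (nchunks : Int) : List (List Int) :=
  match PySem.Int.divmod? ((iterable.length : Int)) nchunks with
  | none => []  -- ZeroDivisionError; excluded by Pre_
  | some (chunk_size, remainder) =>
      makeChunksAltLoop iterable chunk_size remainder nchunks 0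

-- ===== PRECONDITION & SPEC =====
-- Pre_ excludes nchunks = 0 (A raises ZeroDivisionError) and nonempty input with
-- negative nchunks (A's while-loop never terminates there).
def Pre_make_chunks (iterable : List Int) (nchunks : Int) : Prop :=
  0 < nchunks ∨ (iterable = [] ∧ nchunks ≠ 0)
instance (iterable : List Int) (nchunks : Int) : Decidable (Pre_make_chunks iterable nchunks) := by
  unfold Pre_make_chunks; infer_instance

def pvWitness_make_chunks : List Int × Int := ([1, 2, 3, 4, 5], 2)

def Spec_make_chunks (iterable : List Int) (nchunks : Int) (out : List (List Int)) : Prop :=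
  out = make_chunks_alt iterable nchunks
instance (iterable : List Int) (nchunks : Int) (out : List (List Int)) : Decidable (Spec_make_chunks iterable nchunks out) := by unfold Spec_make_chunks; infer_instance

-- ===== CLAIM (what is proved, stated in full; the proofs are below) =====
def Claim_equal_make_chunks : Prop := ∀ (iterable : List Int) (nchunks : Int), Dom_make_chunks iterable nchunks → Pre_make_chunks iterable nchunks → Spec_make_chunks iterable nchunks (make_chunks iterable nchunks)

-- ===== LEMMAS AND PROOFS =====

-- Loop invariant: at round j, A's index is j*cs + min j r0 and its remaining remainder is
-- r0 - min j r0; from there A's while-loop and B's range-loop produce the same chunks.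
theorem makeChunks_loop_eq (iterable : List Int) (n cs r0 : Int)
    (hL : (iterable.length : Int) = cs * n + r0) (_hr0 : 0 ≤ r0) (hr0n : r0 < n)
    (hcs : 0 ≤ cs) :
    ∀ (f : Nat) (j : Int), 0 ≤ j → j ≤ n → (n - j).toNat ≤ f →
      makeChunksLoop iterable (iterable.length : Int) cs f (j * cs + min j r0) (r0 - min j r0)
        = makeChunksAltLoop iterable cs r0 n j := by
  intro f
  induction f with
  | zero =>
    intro j hj0 hjn hf
    have hjn' : j = n := by omega
    subst hjn'
    rw [makeChunksAltLoop, dif_neg (by omega : ¬ j < j)]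
    rfl
  | succ f ih =>
    intro j hj0 hjn hf
    by_cases hj : j < n
    · rw [makeChunksAltLoop, dif_pos hj]
      by_cases hjr : j < r0
      · -- remainder still positive: both take a slice of length cs + 1
        have hmin : min j r0 = j := by omega
        have hrem : r0 - min j r0 ≠ 0 := by omega
        have hi : j * cs + min j r0 < (iterable.length : Int) := by
          rw [hmin, hL]; nlinarith
        have hmin' : min (j + 1) r0 = j + 1 := by omega
        show makeChunksLoop _ _ _ (f+1) _ _ = _
        rw [makeChunksLoop, if_pos hi, if_pos hrem]
        have hrec := ih (j + 1) (by omega) (by omega) (by omega)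
        rw [hmin'] at hrec
        simp only [hmin]
        rw [if_neg (by omega), if_pos hjr]
        refine congrArg₂ _ (by ring_nf) ?_
        rw [show j * cs + j + cs + 1 = (j + 1) * cs + (j + 1) by ring,
            show r0 - j - 1 = r0 - (j + 1) by ring]
        exact hrec
      · -- remainder exhausted: slice of length cs, or break when cs = 0
        have hmin : min j r0 = r0 := by omega
        have hmin' : min (j + 1) r0 = r0 := by omega
        by_cases hc : cs = 0
        · -- B breaks; A's index already equals length
          subst hc
          have hi : ¬ (j * 0 + min j r0 < (iterable.length : Int)) := by
            rw [hmin, hL]; omega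
          show makeChunksLoop _ _ _ (f+1) _ _ = _
          rw [makeChunksLoop, if_neg hi]
          rw [if_neg (by omega : ¬ j < r0), if_pos (by omega : j * 0 + min j r0 ≥ j * 0 + min j r0 + 0 + 0)]
        · have hcs1 : 1 ≤ cs := by omega
          have hi : j * cs + min j r0 < (iterable.length : Int) := by
            rw [hmin, hL]; nlinarith
          show makeChunksLoop _ _ _ (f+1) _ _ = _
          rw [makeChunksLoop, if_pos hi, if_neg (by omega : ¬ r0 - min j r0 ≠ 0)]
          have hrec := ih (j + 1) (by omega) (by omega) (by omega)
          rw [hmin'] at hrec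
          simp only [hmin]
          rw [if_neg (by omega : ¬ j < r0), if_neg (by omega : ¬ j * cs + r0 ≥ j * cs + r0 + cs + 0)]
          refine congrArg₂ _ (by ring_nf) ?_
          rw [show j * cs + r0 + cs = (j + 1) * cs + r0 by ring]
          exact hrec
    · -- j = n: both loops are done (A's index equals length)
      have hjn' : j = n := by omega
      subst hjn'
      rw [makeChunksAltLoop, dif_neg (by omega : ¬ j < j)]
      have hmin : min j r0 = r0 := by omega
      have hi : ¬ (j * cs + min j r0 < (iterable.length : Int)) := by
        rw [hmin, hL]; nlinarith
      show makeChunksLoop _ _ _ (f+1) _ _ = _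
      rw [makeChunksLoop, if_neg hi]

-- ===== VERDICT (by name: the statement is the Claim_ definition above) =====
theorem make_chunks_spec : Claim_equal_make_chunks := by
  intro iterable nchunks _ hpre
  unfold Spec_make_chunks make_chunks make_chunks_alt
  rcases hpre with hn | ⟨hnil, hn0⟩
  · have hn' : nchunks ≠ 0 := by omega
    simp only [PySem.Int.divmod?, hn', if_false]
    have hcs : PySem.Int.floordiv (iterable.length : Int) nchunks * nchunks
        + PySem.Int.mod (iterable.length : Int) nchunks = (iterable.length : Int) :=
      PySem.Int.floordiv_mul_add_mod _ _
    have hm0 : 0 ≤ PySem.Int.mod (iterable.length : Int) nchunks := by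
      rw [PySem.Int.mod_eq_emod_of_pos hn]; exact Int.emod_nonneg _ (by omega)
    have hmlt : PySem.Int.mod (iterable.length : Int) nchunks < nchunks := by
      rw [PySem.Int.mod_eq_emod_of_pos hn]; exact Int.emod_lt_of_pos _ hn
    have hcs0 : 0 ≤ PySem.Int.floordiv (iterable.length : Int) nchunks := by
      rw [PySem.Int.floordiv_eq_ediv_of_pos hn]
      exact Int.ediv_nonneg (by positivity) (by omega)
    have h := makeChunks_loop_eq iterable nchunks
      (PySem.Int.floordiv (iterable.length : Int) nchunks)
      (PySem.Int.mod (iterable.length : Int) nchunks)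
      (by omega) hm0 hmlt hcs0
      (iterable.length + nchunks.natAbs + 1) 0 (le_refl 0) (by omega) (by omega)
    rw [min_eq_left hm0] at h
    simp only [zero_mul, zero_add, sub_zero] at h
    simpa [PySem.Int.floordiv, PySem.Int.mod] using h
  · subst hnil
    simp only [PySem.Int.divmod?, hn0, if_false, List.length_nil]
    by_cases hn : 0 < nchunks
    · rw [makeChunksAltLoop, dif_pos (by omega : (0:Int) < nchunks)]
      simp [makeChunksLoop]
    · rw [makeChunksAltLoop, dif_neg (by omega : ¬ (0:Int) < nchunks)]
      simp [makeChunksLoop]
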